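-- pv_equiv track=rewrite | github.com/mauriciomenon/nmr5dbweb | interface/app_flask_local_search.py | build_compare_overview_summary
-- ===== SOURCE A (Python) =====
-- def build_compare_overview_summary(overview_rows):
--     summary = {
--         "total_tables": len(overview_rows),
--         "same_tables": 0,
--         "diff_tables": 0,
--         "no_key_tables": 0,
--         "error_tables": 0,
--     }
--     for row in overview_rows:
--         status = str(row.get("status") or "").strip().lower()
--         if status == "same":
--             summary["same_tables"] += 1
--         elif status == "diff":
--             summary["diff_tables"] += 1
--         elif status == "no_key":
--             summary["no_key_tables"] += 1
--         else:
--             summary["error_tables"] += 1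
--     return summary
-- ===== SOURCE B (Python) =====
-- def build_compare_overview_summary(overview_rows):
--     statuses = [str(row.get("status") or "").strip().lower() for row in overview_rows]
--     total = len(statuses)
--     same = statuses.count("same")
--     diff = statuses.count("diff")
--     no_key = statuses.count("no_key")
--     return {
--         "total_tables": total,
--         "same_tables": same,
--         "diff_tables": diff,
--         "no_key_tables": no_key,
--         "error_tables": total - (same + diff + no_key),
--     }
-- ===== Notes on version B (the rewrite author's own statement) =====
-- stated objective: alternative
-- what changed: B first materializes the list of normalized statuses, then performs three independent list.count scans for the named statuses and computes error_tables as the arithmetic residual, replacing A's single pass with a four-way branch mutating a pre-seeded summary dict.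
import Mathlib
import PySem

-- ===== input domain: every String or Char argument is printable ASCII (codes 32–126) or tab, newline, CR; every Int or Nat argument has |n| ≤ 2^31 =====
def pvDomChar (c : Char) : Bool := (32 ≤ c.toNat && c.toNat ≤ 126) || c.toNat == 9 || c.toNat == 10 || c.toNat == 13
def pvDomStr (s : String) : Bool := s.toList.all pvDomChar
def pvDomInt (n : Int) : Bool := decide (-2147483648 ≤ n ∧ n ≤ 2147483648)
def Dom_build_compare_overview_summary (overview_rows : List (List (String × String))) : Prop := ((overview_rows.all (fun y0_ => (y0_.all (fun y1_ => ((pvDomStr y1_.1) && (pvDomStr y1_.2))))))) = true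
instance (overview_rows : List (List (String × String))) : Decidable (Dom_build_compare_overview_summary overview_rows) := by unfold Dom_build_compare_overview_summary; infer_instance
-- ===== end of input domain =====

-- B materializes the list of normalized statuses, then runs three independent count
-- scans and computes error_tables as the arithmetic residual, instead of A's single
-- pass with a four-way branch mutating a pre-seeded summary dict (objective: alternative).

-- str(row.get("status") or "").strip().lower()  — 'or ""' maps both None (missing key)
-- and the empty string to "", which getD with default "" reproduces exactly for string values.
def pvNormStatus (row : List (String × String)) : String :=
  PySem.Str.lower (PySem.Str.strip ((PySem.Dict.mk row).getD "status" ""))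

-- ===== PORT A =====
def build_compare_overview_summary (overview_rows : List (List (String × String))) : List (String × Int) :=
  let summary0 : PySem.Dict String Int :=
    (((((PySem.Dict.empty).insert "total_tables" (PySem.List.len overview_rows)).insert
        "same_tables" 0).insert "diff_tables" 0).insert "no_key_tables" 0).insert "error_tables" 0
  let final := overview_rows.foldl (fun summary row =>
    let status := pvNormStatus row
    if status = "same" then summary.modify "same_tables" 0 (· + 1)
    else if status = "diff" then summary.modify "diff_tables" 0 (· + 1)
    else if status = "no_key" then summary.modify "no_key_tables" 0 (· + 1)
    else summary.modify "error_tables" 0 (· + 1)) summary0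
  final.items

-- ===== PORT B =====
def build_compare_overview_summary_alt (overview_rows : List (List (String × String))) : List (String × Int) :=
  let statuses := overview_rows.map pvNormStatus
  let total := PySem.List.len statuses
  let same : Int := PySem.List.count statuses "same"
  let diff : Int := PySem.List.count statuses "diff"
  let no_key : Int := PySem.List.count statuses "no_key"
  [("total_tables", total), ("same_tables", same), ("diff_tables", diff),
   ("no_key_tables", no_key), ("error_tables", total - (same + diff + no_key))]

-- ===== PRECONDITION & SPEC =====
def Spec_build_compare_overview_summary (overview_rows : List (List (String × String))) (out : List (String × Int)) : Prop := out = build_compare_overview_summary_alt overview_rows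
instance (overview_rows : List (List (String × String))) (out : List (String × Int)) : Decidable (Spec_build_compare_overview_summary overview_rows out) := by unfold Spec_build_compare_overview_summary; infer_instance

-- ===== CLAIM (what is proved, stated in full; the proofs are below) =====
def Claim_equal_build_compare_overview_summary : Prop := ∀ (overview_rows : List (List (String × String))), Dom_build_compare_overview_summary overview_rows → Spec_build_compare_overview_summary overview_rows (build_compare_overview_summary overview_rows)

-- ===== LEMMAS AND PROOFS =====

-- A's loop body, as a function of the already-normalized status string
def pvStepA (summary : PySem.Dict String Int) (status : String) : PySem.Dict String Int :=
  if status = "same" then summary.modify "same_tables" 0 (· + 1)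
  else if status = "diff" then summary.modify "diff_tables" 0 (· + 1)
  else if status = "no_key" then summary.modify "no_key_tables" 0 (· + 1)
  else summary.modify "error_tables" 0 (· + 1)

def pvCntE (ls : List String) : Nat :=
  ls.countP (fun x => !(x == "same") && !(x == "diff") && !(x == "no_key"))

lemma pvLoopA (ls : List String) (t s d n e : Int) :
    ls.foldl pvStepA (PySem.Dict.mk [("total_tables", t), ("same_tables", s),
      ("diff_tables", d), ("no_key_tables", n), ("error_tables", e)]) =
    PySem.Dict.mk [("total_tables", t), ("same_tables", s + ls.count "same"),
      ("diff_tables", d + ls.count "diff"), ("no_key_tables", n + ls.count "no_key"),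
      ("error_tables", e + pvCntE ls)] := by
  induction ls generalizing s d n e with
  | nil => simp [pvCntE]
  | cons x ls ih =>
    by_cases h1 : x = "same"
    · simp only [List.foldl_cons, pvStepA, h1, if_true]
      rw [show (PySem.Dict.mk [("total_tables", t), ("same_tables", s), ("diff_tables", d),
            ("no_key_tables", n), ("error_tables", e)]).modify "same_tables" 0 (· + 1) =
          PySem.Dict.mk [("total_tables", t), ("same_tables", s + 1), ("diff_tables", d),
            ("no_key_tables", n), ("error_tables", e)] by
        simp [PySem.Dict.modify, PySem.Dict.contains, PySem.Dict.get?, PySem.Dict.insert, PySem.Dict.getD]]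
      rw [ih]
      simp [pvCntE]
      all_goals omega
    · by_cases h2 : x = "diff"
      · simp only [List.foldl_cons, pvStepA, h2]
        rw [if_neg (by decide), if_pos trivial]
        rw [show (PySem.Dict.mk [("total_tables", t), ("same_tables", s), ("diff_tables", d),
              ("no_key_tables", n), ("error_tables", e)]).modify "diff_tables" 0 (· + 1) =
            PySem.Dict.mk [("total_tables", t), ("same_tables", s), ("diff_tables", d + 1),
              ("no_key_tables", n), ("error_tables", e)] by
          simp [PySem.Dict.modify, PySem.Dict.contains, PySem.Dict.get?, PySem.Dict.insert, PySem.Dict.getD]]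
        rw [ih]
        simp [pvCntE]
        all_goals omega
      · by_cases h3 : x = "no_key"
        · simp only [List.foldl_cons, pvStepA, h3]
          rw [if_neg (by decide), if_neg (by decide), if_pos trivial]
          rw [show (PySem.Dict.mk [("total_tables", t), ("same_tables", s), ("diff_tables", d),
                ("no_key_tables", n), ("error_tables", e)]).modify "no_key_tables" 0 (· + 1) =
              PySem.Dict.mk [("total_tables", t), ("same_tables", s), ("diff_tables", d),
                ("no_key_tables", n + 1), ("error_tables", e)] by
            simp [PySem.Dict.modify, PySem.Dict.contains, PySem.Dict.get?, PySem.Dict.insert, PySem.Dict.getD]]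
          rw [ih]
          simp [pvCntE]
          all_goals omega
        · simp only [List.foldl_cons, pvStepA]
          rw [if_neg h1, if_neg h2, if_neg h3]
          rw [show (PySem.Dict.mk [("total_tables", t), ("same_tables", s), ("diff_tables", d),
                ("no_key_tables", n), ("error_tables", e)]).modify "error_tables" 0 (· + 1) =
              PySem.Dict.mk [("total_tables", t), ("same_tables", s), ("diff_tables", d),
                ("no_key_tables", n), ("error_tables", e + 1)] by
            simp [PySem.Dict.modify, PySem.Dict.contains, PySem.Dict.get?, PySem.Dict.insert, PySem.Dict.getD]]
          rw [ih]
          simp [pvCntE, h1, h2, h3]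
          all_goals omega

-- each element falls in exactly one of the four buckets
lemma pvPartition (ls : List String) :
    ls.count "same" + ls.count "diff" + ls.count "no_key" + pvCntE ls = ls.length := by
  induction ls with
  | nil => simp [pvCntE]
  | cons x ls ih =>
    simp only [pvCntE, List.count_cons, List.countP_cons, List.length_cons] at *
    by_cases h1 : x = "same" <;> by_cases h2 : x = "diff" <;> by_cases h3 : x = "no_key" <;>
      simp [h1, h2, h3] at * <;> omega

-- ===== VERDICT (by name: the statement is the Claim_ definition above) =====
theorem build_compare_overview_summary_spec : Claim_equal_build_compare_overview_summary := by
  unfold Claim_equal_build_compare_overview_summary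
  intro rows _
  unfold Spec_build_compare_overview_summary
  unfold build_compare_overview_summary build_compare_overview_summary_alt
  have hmapA : ∀ init : PySem.Dict String Int, rows.foldl (fun summary row =>
      let status := pvNormStatus row
      if status = "same" then summary.modify "same_tables" 0 (· + 1)
      else if status = "diff" then summary.modify "diff_tables" 0 (· + 1)
      else if status = "no_key" then summary.modify "no_key_tables" 0 (· + 1)
      else summary.modify "error_tables" 0 (· + 1)) init = (rows.map pvNormStatus).foldl pvStepA init := by
    intro init; rw [List.foldl_map]; rfl
  have h0 : (((((PySem.Dict.empty).insert "total_tables" (PySem.List.len rows)).insert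
      "same_tables" 0).insert "diff_tables" 0).insert "no_key_tables" 0).insert "error_tables" 0 =
      PySem.Dict.mk [("total_tables", PySem.List.len rows), ("same_tables", (0:Int)),
        ("diff_tables", 0), ("no_key_tables", 0), ("error_tables", 0)] := by
    rfl
  simp only [hmapA, h0]
  rw [pvLoopA]
  have hpart := pvPartition (rows.map pvNormStatus)
  simp only [List.length_map] at hpart
  have hlenA : PySem.List.len rows = (rows.length : Int) := by simp [PySem.List.len_eq]
  have hlenB : PySem.List.len (rows.map pvNormStatus) = (rows.length : Int) := by
    simp [PySem.List.len_eq]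
  refine List.ext_getElem (by simp [PySem.Dict.items, PySem.Dict.mk]) ?_
  intro i hi hi2
  simp only [List.length_cons, List.length_nil] at hi2
  interval_cases i <;> simp [PySem.Dict.items, PySem.Dict.mk, PySem.List.count_eq, hlenA, hlenB] <;> omega
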